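-- pv_equiv track=rewrite | github.com/xy-always/EARA | src/get_similarity.py | get_sim
-- ===== SOURCE A (Python) =====
-- def get_sim(sentence):
--     length = len(sentence)
--     sim_matrix = []
--     for i, w in enumerate(sentence):
--         # sim_matrix = []
--         if i == 0: # 如果是[CLS],则和所有的实体做attention
--             for j, w1 in enumerate(sentence):
--                 if j == i:
--                     sim_matrix.append(1)
--                 else:
--                     if w1 != 1: # 1 stands O
--                         sim_matrix.append(1)
--                     else:
--                         sim_matrix.append(0)
--         else:
--             if w == 1:
--                 sim_matrix.extend([0]*length)
--             else:
--                 for j, w1 in enumerate(sentence):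
--                     if j == 0:
--                         sim_matrix.append(1)
--                     else:
--                         if w == w1:
--                             sim_matrix.append(1)
--                         else:
--                             sim_matrix.append(0)
--         # sim_matrix.append(sim)
--
--     return sim_matrix
-- ===== SOURCE B (Python) =====
-- def get_sim(sentence):
--     n = len(sentence)
--     groups = {}
--     for idx, lab in enumerate(sentence):
--         groups.setdefault(lab, []).append(idx)
--     rows = []
--     for i, lab in enumerate(sentence):
--         if i == 0:
--             row = [1] * n
--             for j in groups.get(1, []):
--                 if j != 0:
--                     row[j] = 0
--             rows.append(row)
--         elif lab == 1:
--             rows.append([0] * n)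
--         else:
--             row = [0] * n
--             row[0] = 1
--             for j in groups[lab]:
--                 row[j] = 1
--             rows.append(row)
--     return [x for row in rows for x in row]
-- ===== Notes on version B (the rewrite author's own statement) =====
-- stated objective: alternative
-- what changed: B first builds a dict grouping each label to its positions, then emits each row by scatter-writing 1s (or zeroing the O positions of the CLS row) into a preallocated zero/one row and flattens the rows, replacing A's per-pair equality comparisons in nested loops with group-index lookups.
import Mathlib
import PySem

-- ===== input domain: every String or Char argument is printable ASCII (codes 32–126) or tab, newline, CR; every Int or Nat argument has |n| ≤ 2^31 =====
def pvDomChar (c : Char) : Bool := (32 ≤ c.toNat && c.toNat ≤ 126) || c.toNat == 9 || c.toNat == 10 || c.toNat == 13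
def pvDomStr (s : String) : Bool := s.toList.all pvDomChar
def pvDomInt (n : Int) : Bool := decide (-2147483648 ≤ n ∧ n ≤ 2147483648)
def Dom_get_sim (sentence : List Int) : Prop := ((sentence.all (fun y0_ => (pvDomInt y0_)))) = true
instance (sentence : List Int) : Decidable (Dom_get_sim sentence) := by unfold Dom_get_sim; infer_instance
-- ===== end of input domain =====

-- B builds a positions-by-label dict once and scatter-writes each row instead of A's per-pair equality comparisons in nested loops (alternative decomposition, same output).

-- ===== PORT A =====
def get_sim (sentence : List Int) : List Int :=
  let length := sentence.length
  (PySem.List.enumerate sentence).foldl (fun sim_matrix p =>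
    if p.1 == 0 then
      (PySem.List.enumerate sentence).foldl (fun sm q =>
        if q.1 == p.1 then sm ++ [1]
        else if q.2 ≠ 1 then sm ++ [1] else sm ++ [0]) sim_matrix
    else if p.2 == 1 then sim_matrix ++ List.replicate length 0
    else
      (PySem.List.enumerate sentence).foldl (fun sm q =>
        if q.1 == 0 then sm ++ [1]
        else if p.2 == q.2 then sm ++ [1] else sm ++ [0]) sim_matrix) []

-- ===== PORT B =====
def get_sim_alt (sentence : List Int) : List Int :=
  let n := sentence.length
  let groups := (PySem.List.enumerate sentence).foldl
      (fun d p => d.modify p.2 ([] : List Int) (· ++ [p.1])) PySem.Dict.empty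
  let rows := (PySem.List.enumerate sentence).map (fun p =>
    if p.1 == 0 then
      (groups.getD 1 []).foldl
        (fun r j => if j ≠ 0 then r.set j.toNat 0 else r) (List.replicate n (1 : Int))
    else if p.2 == 1 then List.replicate n (0 : Int)
    else
      (groups.getD p.2 []).foldl
        (fun r j => r.set j.toNat 1) ((List.replicate n (0 : Int)).set 0 1))
  rows.flatten

-- ===== PRECONDITION & SPEC =====
def Spec_get_sim (sentence : List Int) (out : List Int) : Prop := out = get_sim_alt sentence
instance (sentence : List Int) (out : List Int) : Decidable (Spec_get_sim sentence out) := by unfold Spec_get_sim; infer_instance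

-- ===== CLAIM (what is proved, stated in full; the proofs are below) =====
def Claim_equal_get_sim : Prop := ∀ (sentence : List Int), Dom_get_sim sentence → Spec_get_sim sentence (get_sim sentence)

-- ===== LEMMAS AND PROOFS =====
def gA (s : List Int) (p : Int × Int) : List Int :=
  if p.1 == 0 then
    (PySem.List.enumerate s).map (fun q => if q.1 == p.1 then (1:Int) else if q.2 ≠ 1 then 1 else 0)
  else if p.2 == 1 then List.replicate s.length 0
  else (PySem.List.enumerate s).map (fun q => if q.1 == 0 then (1:Int) else if p.2 == q.2 then 1 else 0)

theorem A_flatMap (s : List Int) :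
    get_sim s = (PySem.List.enumerate s).flatMap (gA s) := by
  unfold get_sim
  have h : (fun (sim_matrix : List Int) (p : Int × Int) =>
      if p.1 == 0 then
        (PySem.List.enumerate s).foldl (fun sm q =>
          if q.1 == p.1 then sm ++ [1]
          else if q.2 ≠ 1 then sm ++ [1] else sm ++ [0]) sim_matrix
      else if p.2 == 1 then sim_matrix ++ List.replicate s.length 0
      else
        (PySem.List.enumerate s).foldl (fun sm q =>
          if q.1 == 0 then sm ++ [1]
          else if p.2 == q.2 then sm ++ [1] else sm ++ [0]) sim_matrix)
      = fun sim_matrix p => sim_matrix ++ gA s p := by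
    funext sm p
    unfold gA
    split_ifs with h1 h2
    · have : (fun (sm : List Int) (q : Int × Int) =>
          if q.1 == p.1 then sm ++ [1]
          else if q.2 ≠ 1 then sm ++ [1] else sm ++ [0])
          = fun sm q => sm ++ [if q.1 == p.1 then (1:Int) else if q.2 ≠ 1 then 1 else 0] := by
        funext a q; split_ifs <;> rfl
      rw [this, PySem.List.foldl_append_singleton_eq_map]
    · rfl
    · have : (fun (sm : List Int) (q : Int × Int) =>
          if q.1 == 0 then sm ++ [1]
          else if p.2 == q.2 then sm ++ [1] else sm ++ [0])
          = fun sm q => sm ++ [if q.1 == 0 then (1:Int) else if p.2 == q.2 then 1 else 0] := by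
        funext a q; split_ifs <;> rfl
      rw [this, PySem.List.foldl_append_singleton_eq_map]
  dsimp only
  rw [h, PySem.List.foldl_append_eq_flatMap]
  simp

def groupsOf (s : List Int) : PySem.Dict Int (List Int) :=
  (PySem.List.enumerate s).foldl
    (fun d p => d.modify p.2 ([] : List Int) (· ++ [p.1])) PySem.Dict.empty

theorem groupsOf_getD (s : List Int) (c : Int) :
    (groupsOf s).getD c [] =
      (((PySem.List.enumerate s).map Prod.swap).filter (fun p => p.1 == c)).map (·.2) := by
  have h := PySem.Dict.getD_foldl_modify_append
    (l := (PySem.List.enumerate s).map Prod.swap) (d := (PySem.Dict.empty : PySem.Dict Int (List Int))) (c := c)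
  simp only [List.foldl_map, Prod.fst_swap, Prod.snd_swap, PySem.Dict.getD_empty,
    List.nil_append] at h
  unfold groupsOf
  exact h

theorem mem_groupsOf (s : List Int) (c x : Int) :
    x ∈ (groupsOf s).getD c [] ↔
      ∃ (k : Nat) (h : k < s.length), x = (k : Int) ∧ s[k] = c := by
  rw [groupsOf_getD]
  simp only [List.mem_map, List.mem_filter, PySem.List.mem_enumerate_iff, beq_iff_eq]
  constructor
  · rintro ⟨p, ⟨⟨q, ⟨⟨k, hk, rfl⟩, rfl⟩⟩, h1⟩, rfl⟩
    exact ⟨k, hk, by simp, by simpa using h1⟩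
  · rintro ⟨k, hk, rfl, hc⟩
    exact ⟨(c, (k : Int)), ⟨⟨((k : Int), s[k]), ⟨⟨k, hk, by simp⟩, by simp [hc]⟩⟩, by simp⟩, rfl⟩

theorem scatter_getElem? (L : List Int) (v : Int) (base : List Int)
    (hL : ∀ j ∈ L, 0 ≤ j ∧ j.toNat < base.length) (m : Nat) :
    (L.foldl (fun r j => r.set j.toNat v) base)[m]? =
      if (m : Int) ∈ L then some v else base[m]? := by
  induction L generalizing base with
  | nil => simp
  | cons a t ih =>
    obtain ⟨ha0, hal⟩ := hL a (by simp)
    have ht : ∀ j ∈ t, 0 ≤ j ∧ j.toNat < (base.set a.toNat v).length := by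
      intro j hj; simpa using hL j (by simp [hj])
    rw [List.foldl_cons, ih _ ht, List.getElem?_set]
    by_cases hmt : (m : Int) ∈ t
    · simp [hmt]
    · rw [if_neg hmt]
      by_cases ham : a = (m : Int)
      · have hm : a.toNat = m := by omega
        rw [if_pos hm, if_pos (hm ▸ hal), if_pos (List.mem_cons.mpr (Or.inl ham.symm))]
      · have hm : ¬ a.toNat = m := by omega
        rw [if_neg hm, if_neg (by
          intro hc
          rcases List.mem_cons.mp hc with h | h
          · exact ham h.symm
          · exact hmt h)]

theorem scatterg_getElem? (L : List Int) (base : List Int)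
    (hL : ∀ j ∈ L, 0 ≤ j ∧ j.toNat < base.length) (m : Nat) :
    (L.foldl (fun r j => if j ≠ 0 then r.set j.toNat 0 else r) base)[m]? =
      if (m : Int) ∈ L ∧ (m : Int) ≠ 0 then some 0 else base[m]? := by
  induction L generalizing base with
  | nil => simp
  | cons a t ih =>
    obtain ⟨ha0, hal⟩ := hL a (by simp)
    by_cases haz : a = 0
    · rw [List.foldl_cons, if_neg (by simp [haz]),
        ih _ (fun j hj => hL j (by simp [hj]))]
      by_cases h : (m : Int) ∈ t ∧ (m : Int) ≠ 0
      · rw [if_pos h, if_pos ⟨List.mem_cons.mpr (Or.inr h.1), h.2⟩]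
      · rw [if_neg h, if_neg (by
          intro hc
          rcases List.mem_cons.mp hc.1 with h1 | h1
          · exact hc.2 (by omega)
          · exact h ⟨h1, hc.2⟩)]
    · have ht : ∀ j ∈ t, 0 ≤ j ∧ j.toNat < (base.set a.toNat 0).length := by
        intro j hj; simpa using hL j (by simp [hj])
      rw [List.foldl_cons, if_pos haz, ih _ ht]
      by_cases h : (m : Int) ∈ t ∧ (m : Int) ≠ 0
      · rw [if_pos h, if_pos ⟨List.mem_cons.mpr (Or.inr h.1), h.2⟩]
      · rw [if_neg h, List.getElem?_set]
        by_cases ham : a = (m : Int)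
        · have hm0 : (m : Int) ≠ 0 := by omega
          have hmt : (m : Int) ∉ t := fun hc => h ⟨hc, hm0⟩
          rw [if_pos (by omega : a.toNat = m), if_pos (by omega : a.toNat < base.length),
            if_pos ⟨List.mem_cons.mpr (Or.inl ham.symm), hm0⟩]
        · rw [if_neg (by omega : ¬ a.toNat = m), if_neg (by
            intro hc
            rcases List.mem_cons.mp hc.1 with h1 | h1
            · exact ham h1.symm
            · exact h ⟨h1, hc.2⟩)]


def rowB (s : List Int) (p : Int × Int) : List Int :=
  if p.1 == 0 then
    ((groupsOf s).getD 1 []).foldl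
      (fun r j => if j ≠ 0 then r.set j.toNat 0 else r) (List.replicate s.length (1 : Int))
  else if p.2 == 1 then List.replicate s.length (0 : Int)
  else
    ((groupsOf s).getD p.2 []).foldl
      (fun r j => r.set j.toNat 1) ((List.replicate s.length (0 : Int)).set 0 1)

theorem alt_eq_rows (s : List Int) :
    get_sim_alt s = ((PySem.List.enumerate s).map (rowB s)).flatten := rfl

theorem group_in_range (s : List Int) (c : Int) :
    ∀ j ∈ (groupsOf s).getD c [], 0 ≤ j ∧ j.toNat < s.length := by
  intro j hj
  obtain ⟨k, hk, rfl, _⟩ := (mem_groupsOf s c j).mp hj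
  constructor <;> omega

theorem mem_groupsOf_nat (s : List Int) (c : Int) (m : Nat) :
    ((m : Int) ∈ (groupsOf s).getD c [] ) ↔ (m < s.length ∧ ∃ h : m < s.length, s[m] = c) := by
  rw [mem_groupsOf]
  constructor
  · rintro ⟨k, hk, hkm, hc⟩
    have : m = k := by omega
    subst this
    exact ⟨hk, hk, hc⟩
  · rintro ⟨h, h', hc⟩
    exact ⟨m, h, rfl, hc⟩

theorem enum_getElem?_lt (s : List Int) (m : Nat) (hm : m < s.length) :
    (PySem.List.enumerate s)[m]? = some ((m : Int), s[m]'hm) := by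
  rw [PySem.List.getElem?_enumerate]
  simp [List.getElem?_eq_getElem hm]

theorem enum_getElem?_ge (s : List Int) (m : Nat) (hm : ¬ m < s.length) :
    (PySem.List.enumerate s)[m]? = none := by
  rw [PySem.List.getElem?_enumerate]
  simp [List.getElem?_eq_none (by omega : s.length ≤ m)]

theorem row_eq (s : List Int) (p : Int × Int) (hp : p ∈ PySem.List.enumerate s) :
    gA s p = rowB s p := by
  obtain ⟨k, hk, rfl⟩ := (PySem.List.mem_enumerate_iff _ _ _).mp hp
  unfold gA rowB
  simp only [beq_iff_eq, zero_add]
  by_cases hk0 : k = 0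
  · subst hk0
    rw [if_pos (by norm_num), if_pos (by norm_num)]
    apply List.ext_getElem?
    intro m
    rw [scatterg_getElem? _ _ (by simpa using group_in_range s 1) m]
    by_cases hm : m < s.length
    · rw [List.getElem?_map, enum_getElem?_lt s m hm, Option.map_some,
        List.getElem?_replicate, if_pos hm]
      dsimp only
      by_cases hm0 : m = 0
      · subst hm0
        rw [if_pos (by norm_num), if_neg (fun hc => hc.2 (by norm_num))]
      · have hm0' : ((m : Int)) ≠ 0 := by exact_mod_cast hm0
        rw [if_neg (by exact_mod_cast hm0)]
        by_cases h1 : s[m]'hm = 1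
        · rw [if_neg (by simpa using h1),
            if_pos ⟨(mem_groupsOf_nat s 1 m).mpr ⟨hm, hm, h1⟩, hm0'⟩]
        · rw [if_pos (by simpa using h1),
            if_neg (fun hc => h1 ((mem_groupsOf_nat s 1 m).mp hc.1).2.2)]
    · rw [List.getElem?_map, enum_getElem?_ge s m hm,
        if_neg (fun hc => hm ((mem_groupsOf_nat s 1 m).mp hc.1).1),
        List.getElem?_replicate, if_neg hm]
      rfl
  · have hk0' : ((k : Int)) ≠ 0 := by exact_mod_cast hk0
    rw [if_neg hk0', if_neg hk0']
    by_cases hw : s[k]'hk = 1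
    · rw [if_pos hw, if_pos hw]
    · rw [if_neg hw, if_neg hw]
      have hn : 0 < s.length := by omega
      apply List.ext_getElem?
      intro m
      rw [scatter_getElem? _ _ _ (by simpa using group_in_range s (s[k]'hk)) m]
      by_cases hm : m < s.length
      · rw [List.getElem?_map, enum_getElem?_lt s m hm, Option.map_some]
        dsimp only
        by_cases hm0 : m = 0
        · subst hm0
          rw [if_pos (by norm_num)]
          by_cases hs0 : s[0]'hm = s[k]'hk
          · rw [if_pos ((mem_groupsOf_nat s _ 0).mpr ⟨hm, hm, hs0⟩)]
          · rw [if_neg (fun hc => hs0 ((mem_groupsOf_nat s _ 0).mp hc).2.2),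
              List.getElem?_set, if_pos rfl, if_pos (by simpa using hn)]
        · rw [if_neg (by exact_mod_cast hm0)]
          by_cases hsm : s[m]'hm = s[k]'hk
          · rw [if_pos hsm.symm, if_pos ((mem_groupsOf_nat s _ m).mpr ⟨hm, hm, hsm⟩)]
          · rw [if_neg (fun h => hsm h.symm),
              if_neg (fun hc => hsm ((mem_groupsOf_nat s _ m).mp hc).2.2),
              List.getElem?_set, if_neg (by omega), List.getElem?_replicate, if_pos hm]
      · rw [List.getElem?_map, enum_getElem?_ge s m hm,
          if_neg (fun hc => hm ((mem_groupsOf_nat s _ m).mp hc).1),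
          List.getElem?_set, if_neg (by omega), List.getElem?_replicate, if_neg hm]
        rfl

theorem get_sim_eq_alt (s : List Int) : get_sim s = get_sim_alt s := by
  rw [A_flatMap, alt_eq_rows, List.flatMap_def]
  exact congrArg List.flatten (List.map_congr_left (row_eq s))

-- ===== VERDICT (by name: the statement is the Claim_ definition above) =====
theorem get_sim_spec : Claim_equal_get_sim := by
  intro s _
  exact (get_sim_eq_alt s)
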